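-- pv_equiv track=rewrite | github.com/the-robot/coding-challenges | leetcode/grokking-coding-interview/13-top-k-elements/maximum-distinct-elements.py | findMaxDinstinctElements
-- ===== SOURCE A (Python) =====
-- from typing import List
-- import heapq
--
-- def findMaxDinstinctElements(nums: List[int], k: int) -> int:
--     # get frequency of each number
--     frequencies = {}
--     for num in nums:
--         frequencies[num] = frequencies.get(num, 0) + 1
--
--     # add [num, freq] to min heap
--     # set num negative, so we can pop larger number first
--     maxHeap = []
--     for num, freq in frequencies.items():
--         heapq.heappush(maxHeap, [-num, freq])
--
--     # pop larger number first, and if it has duplicate and k > 0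
--     # use k numbers to remove duplicate number
--     result = []
--     while maxHeap:
--         popped = heapq.heappop(maxHeap)
--
--         # if has duplicate and we still have k chances left
--         # to use to remove duplicate
--         while popped[1] > 1 and k > 0:
--             popped[1] -= 1
--             k -= 1
--
--         # if no duplicate, add to result; else skip
--         if popped[1] == 1:
--             result.append(-popped[0])
--
--     # if we still have k, remove some distinct numbers
--     # remove the smaller numbers first, so we can get maximum distinct numbers
--     while k > 0:
--         result = result[:-1]
--         k -= 1
--
--     return result
-- ===== SOURCE B (Python) =====
-- def findMaxDinstinctElements(nums, k):
--     # Sort the whole array descending once; equal values form consecutive runs.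
--     ordered = sorted(nums, reverse=True)
--     n = len(ordered)
--     # Walk the runs keeping a prefix count of duplicates seen so far.  A value is
--     # kept iff it is unique or all duplicates up to and including its run fit in k.
--     result = []
--     dups = 0
--     i = 0
--     while i < n:
--         j = i
--         while j < n and ordered[j] == ordered[i]:
--             j += 1
--         dups += j - i - 1
--         if j - i == 1 or dups <= k:
--             result.append(ordered[i])
--         i = j
--     # Deletions not used on duplicates drop the smallest kept values.
--     leftover = k - dups
--     if leftover > 0:
--         del result[-leftover:]
--     return result
-- ===== Notes on version B (the rewrite author's own statement) =====
-- stated objective: faster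
-- what changed: Drops A's frequency dict, heap and both unit-step while loops: B sorts the whole array descending once, scans its runs of equal values keeping a running prefix count of duplicates, keeps a value iff it is unique or the cumulative duplicates fit in k (no budget mutation), and removes the trailing smallest values with a single del slice.
import Mathlib
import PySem

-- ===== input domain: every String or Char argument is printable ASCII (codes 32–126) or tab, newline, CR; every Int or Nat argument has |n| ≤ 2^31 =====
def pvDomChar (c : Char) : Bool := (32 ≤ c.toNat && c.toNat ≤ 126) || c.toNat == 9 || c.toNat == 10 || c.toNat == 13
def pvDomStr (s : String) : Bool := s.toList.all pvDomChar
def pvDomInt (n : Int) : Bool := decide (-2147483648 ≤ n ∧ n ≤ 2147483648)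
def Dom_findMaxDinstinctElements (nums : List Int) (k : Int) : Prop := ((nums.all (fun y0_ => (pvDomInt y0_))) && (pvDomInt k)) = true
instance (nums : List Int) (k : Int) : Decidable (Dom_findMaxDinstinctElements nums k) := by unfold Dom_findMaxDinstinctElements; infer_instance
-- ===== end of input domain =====

-- B discards A's frequency dict, heap and unit-step budget loops entirely: it sorts the whole
-- array descending once, scans the runs of equal values with a prefix duplicate count, keeps a
-- value iff its run's duplicates fit cumulatively in k, and trims the tail with one deletion.


-- ===== PORT A =====
-- heapq.heappush on lists [-num, freq]: modelled as insertion into the ascending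
-- lexicographically sorted list; exact here because heappop always returns the minimum and
-- in this program all first components (-num, num a dict key) are distinct, so the pop
-- sequence is exactly the ascending lexicographic order.
def pyHeapPush (h : List (Int × Int)) (p : Int × Int) : List (Int × Int) :=
  match h with
  | [] => [p]
  | q :: t =>
    if p.1 < q.1 ∨ (p.1 = q.1 ∧ p.2 ≤ q.2) then p :: q :: t else q :: pyHeapPush t p

-- inner `while popped[1] > 1 and k > 0: popped[1] -= 1; k -= 1`
-- (structural fuel: the loop decrements f each turn, so f.toNat iterations always suffice)
def reduceDupGo : Nat → Int → Int → Int × Int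
  | 0, f, k => (f, k)
  | n + 1, f, k => if 1 < f ∧ 0 < k then reduceDupGo n (f - 1) (k - 1) else (f, k)

def reduceDup (f k : Int) : Int × Int := reduceDupGo f.toNat f k

-- outer `while maxHeap:` pop loop; returns (result, remaining k)
def popLoop : List (Int × Int) → Int → List Int × Int
  | [], k => ([], k)
  | p :: h, k =>
    let fk := reduceDup p.2 k
    let rest := popLoop h fk.2
    (if fk.1 = 1 then (-p.1) :: rest.1 else rest.1, rest.2)

-- trailing `while k > 0: result = result[:-1]; k -= 1` (runs exactly k.toNat times)
def trimGo : Nat → List Int → List Int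
  | 0, r => r
  | n + 1, r => trimGo n (PySem.List.slice r none (some (-1)))

def trimLoop (r : List Int) (k : Int) : List Int := trimGo k.toNat r

def findMaxDinstinctElements (nums : List Int) (k : Int) : List Int :=
  let frequencies := nums.foldl (fun d n => d.insert n (d.getD n 0 + 1)) PySem.Dict.empty
  let maxHeap := frequencies.items.foldl (fun h p => pyHeapPush h (-p.1, p.2)) []
  let rk := popLoop maxHeap k
  trimLoop rk.1 rk.2

-- ===== PORT B =====
-- `while i < n:` run scan over the sorted array; j-i-1 duplicates in the current run become
-- run.length (run = the equal elements after the head); returns (result, total duplicates)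
def scanRuns (k : Int) : List Int → Int → List Int × Int
  | [], dups => ([], dups)
  | v :: t, dups =>
    let run := t.takeWhile (fun x => x == v)
    let rest := t.dropWhile (fun x => x == v)
    let dups' := dups + run.length
    let r := scanRuns k rest dups'
    (if run.length = 0 ∨ dups' ≤ k then v :: r.1 else r.1, r.2)
termination_by l => l.length
decreasing_by
  have := List.length_dropWhile_le (p := fun x => x == v) (l := t)
  simp only [List.length_cons]
  omega

def findMaxDinstinctElements_alt (nums : List Int) (k : Int) : List Int :=
  let ordered := PySem.List.sorted nums (fun x => x) true
  let rd := scanRuns k ordered 0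
  let leftover := k - rd.2
  -- `del result[-leftover:]` removes the last `leftover` elements
  if 0 < leftover then PySem.List.slice rd.1 none (some (-leftover)) else rd.1

-- ===== PRECONDITION & SPEC =====
def Spec_findMaxDinstinctElements (nums : List Int) (k : Int) (out : List Int) : Prop := out = findMaxDinstinctElements_alt nums k
instance (nums : List Int) (k : Int) (out : List Int) : Decidable (Spec_findMaxDinstinctElements nums k out) := by unfold Spec_findMaxDinstinctElements; infer_instance

-- ===== CLAIM (what is proved, stated in full; the proofs are below) =====
def Claim_equal_findMaxDinstinctElements : Prop := ∀ (nums : List Int) (k : Int), Dom_findMaxDinstinctElements nums k → Spec_findMaxDinstinctElements nums k (findMaxDinstinctElements nums k)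

-- ===== LEMMAS AND PROOFS =====

-- reference recursion for A's pop loop over the distinct values (budget form)
def bRec (cnt : Int → Int) : List Int → Int → List Int × Int
  | [], k => ([], k)
  | v :: t, k =>
    let use := min (cnt v - 1) (max k 0)
    let rest := bRec cnt t (k - use)
    (if cnt v - use = 1 then v :: rest.1 else rest.1, rest.2)

-- reference recursion for B's run scan over the distinct values (prefix-dup-sum form)
def dRec (cnt : Int → Int) (k : Int) : List Int → Int → List Int × Int
  | [], d => ([], d)
  | v :: t, d =>
    let d' := d + cnt v - 1
    let r := dRec cnt k t d'
    (if cnt v = 1 ∨ d' ≤ k then v :: r.1 else r.1, r.2)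

theorem reduceDupGo_eq (n : Nat) (f k : Int) (hf : 1 ≤ f)
    (hn : min (f - 1) (max k 0) ≤ (n : Int)) :
    reduceDupGo n f k = (f - min (f - 1) (max k 0), k - min (f - 1) (max k 0)) := by
  induction n generalizing f k with
  | zero =>
    have : min (f - 1) (max k 0) = 0 := by omega
    simp [reduceDupGo, this]
  | succ n ih =>
    by_cases h : 1 < f ∧ 0 < k
    · have h1 : (1 : Int) ≤ f - 1 := by omega
      have h2 : min (f - 1 - 1) (max (k - 1) 0) ≤ (n : Int) := by
        push_cast at hn ⊢; omega
      have := ih (f - 1) (k - 1) h1 h2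
      simp only [reduceDupGo, if_pos h, this, Prod.mk.injEq]
      constructor <;> omega
    · have : min (f - 1) (max k 0) = 0 := by omega
      simp [reduceDupGo, if_neg h, this]

theorem reduceDup_eq (f k : Int) (hf : 1 ≤ f) :
    reduceDup f k = (f - min (f - 1) (max k 0), k - min (f - 1) (max k 0)) := by
  exact reduceDupGo_eq f.toNat f k hf (by omega)

theorem pyHeapPush_perm : ∀ (h : List (Int × Int)) (p : Int × Int),
    (pyHeapPush h p).Perm (p :: h)
  | [], p => by simp [pyHeapPush]
  | q :: t, p => by
    simp only [pyHeapPush]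
    split
    · exact List.Perm.refl _
    · exact ((pyHeapPush_perm t p).cons q).trans (List.Perm.swap p q t)

theorem pyHeapPush_sorted : ∀ (h : List (Int × Int)) (p : Int × Int),
    h.Pairwise (fun a b => a.1 < b.1) → (∀ q ∈ h, q.1 ≠ p.1) →
    (pyHeapPush h p).Pairwise (fun a b => a.1 < b.1)
  | [], p, _, _ => by simp [pyHeapPush]
  | q :: t, p, hs, hne => by
    rw [List.pairwise_cons] at hs
    obtain ⟨hq, hst⟩ := hs
    have hpq : q.1 ≠ p.1 := hne q (List.mem_cons_self ..)
    simp only [pyHeapPush]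
    split
    · rename_i hcond
      have hlt : p.1 < q.1 := by omega
      refine List.pairwise_cons.2 ⟨?_, List.pairwise_cons.2 ⟨hq, hst⟩⟩
      intro b hb
      rcases List.mem_cons.1 hb with rfl | hb
      · exact hlt
      · exact lt_trans hlt (hq b hb)
    · rename_i hcond
      have hlt : q.1 < p.1 := by
        rcases lt_trichotomy p.1 q.1 with h | h | h
        · exact absurd (Or.inl h) hcond
        · exact absurd h.symm hpq
        · exact h
      refine List.pairwise_cons.2 ⟨?_, pyHeapPush_sorted t p hst
        (fun r hr => hne r (List.mem_cons_of_mem _ hr))⟩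
      intro b hb
      have : b ∈ p :: t := (pyHeapPush_perm t p).mem_iff.1 hb
      rcases List.mem_cons.1 this with rfl | hb'
      · exact hlt
      · exact hq b hb'

theorem heapFold_perm : ∀ (l acc : List (Int × Int)),
    (l.foldl pyHeapPush acc).Perm (acc ++ l)
  | [], acc => by simp
  | p :: l, acc => by
    simp only [List.foldl_cons]
    exact (heapFold_perm l (pyHeapPush acc p)).trans
      (((pyHeapPush_perm acc p).append_right l).trans List.perm_middle.symm)

theorem heapFold_sorted : ∀ (l acc : List (Int × Int)),
    acc.Pairwise (fun a b => a.1 < b.1) →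
    ((acc ++ l).map Prod.fst).Nodup →
    (l.foldl pyHeapPush acc).Pairwise (fun a b => a.1 < b.1)
  | [], acc, hs, _ => hs
  | p :: l, acc, hs, hnd => by
    simp only [List.foldl_cons]
    have hnd' : ((acc.map Prod.fst) ++ (p.1 :: l.map Prod.fst)).Nodup := by
      simpa using hnd
    rw [List.nodup_append] at hnd'
    have hne : ∀ q ∈ acc, q.1 ≠ p.1 := by
      intro q hq
      exact hnd'.2.2 q.1 (List.mem_map_of_mem (f := Prod.fst) hq) p.1
        (List.mem_cons_self ..)
    apply heapFold_sorted l (pyHeapPush acc p) (pyHeapPush_sorted acc p hs hne)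
    have hperm : ((pyHeapPush acc p ++ l).map Prod.fst).Perm ((acc ++ p :: l).map Prod.fst) := by
      refine List.Perm.map _ ?_
      exact (((pyHeapPush_perm acc p).append_right l).trans List.perm_middle.symm)
    exact hperm.nodup_iff.2 hnd

theorem vals_pairwise_gt (vals : List Int) (hnd : vals.Nodup) :
    (PySem.List.sorted vals (fun x => x) true).Pairwise (fun a b => b < a) := by
  have hndS : (PySem.List.sorted vals (fun x => x) true).Nodup :=
    (PySem.List.sorted_perm vals (fun x => x) true).nodup_iff.2 hnd
  have h1 := PySem.List.sorted_pairwise_rev vals (fun x => x)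
  have h2 : (PySem.List.sorted vals (fun x => x) true).Pairwise (fun a b => a ≠ b) := hndS
  exact (h1.and h2).imp (fun hab => lt_of_le_of_ne hab.1 (Ne.symm hab.2))

theorem heapFold_eq_sorted (vals : List Int) (cnt : Int → Int) (hnd : vals.Nodup) :
    ((vals.map (fun v => (-v, cnt v))).foldl pyHeapPush []) =
      (PySem.List.sorted vals (fun x => x) true).map (fun v => (-v, cnt v)) := by
  have hperm : ((vals.map (fun v => (-v, cnt v))).foldl pyHeapPush []).Perm
      ((PySem.List.sorted vals (fun x => x) true).map (fun v => (-v, cnt v))) := by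
    refine (heapFold_perm _ []).trans ?_
    simp only [List.nil_append]
    exact (List.Perm.map _ (PySem.List.sorted_perm vals (fun x => x) true)).symm
  have hndf : ((([] : List (Int × Int)) ++ vals.map (fun v => (-v, cnt v))).map Prod.fst).Nodup := by
    simp only [List.nil_append, List.map_map]
    have : (Prod.fst ∘ fun v : Int => (-v, cnt v)) = fun v : Int => -v := rfl
    rw [this]
    exact hnd.map (fun a b h => by omega)
  have hsL := heapFold_sorted (vals.map (fun v => (-v, cnt v))) [] (by simp) hndf
  have hsT : ((PySem.List.sorted vals (fun x => x) true).map
      (fun v => (-v, cnt v))).Pairwise (fun a b => a.1 < b.1) := by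
    exact (List.pairwise_map).2 ((vals_pairwise_gt vals hnd).imp (fun h => by simpa using by omega))
  exact hperm.eq_of_pairwise
    (fun a b _ _ h1 h2 => absurd (lt_trans h1 h2) (lt_irrefl _)) hsL hsT

theorem popLoop_eq_bRec (cnt : Int → Int) : ∀ (vals : List Int) (k : Int),
    (∀ v ∈ vals, 1 ≤ cnt v) →
    popLoop (vals.map (fun v => (-v, cnt v))) k = bRec cnt vals k
  | [], k, _ => rfl
  | v :: t, k, h1 => by
    simp only [List.map_cons, popLoop, bRec,
      reduceDup_eq (cnt v) k (h1 v (List.mem_cons_self ..)),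
      popLoop_eq_bRec cnt t _ (fun w hw => h1 w (List.mem_cons_of_mem _ hw)), neg_neg]

theorem trimGo_eq : ∀ (n : Nat) (r : List Int), trimGo n r = r.take (r.length - n)
  | 0, r => by simp [trimGo]
  | n + 1, r => by
    rw [trimGo, PySem.List.slice_to_neg_one, trimGo_eq n r.dropLast,
      List.dropLast_eq_take, List.take_take, List.length_take]
    congr 1
    omega

-- B's run scan on a list of grouped runs is the prefix-dup-sum recursion over the distinct values
theorem takeWhile_replicate_append (v : Int) (m : Nat) (l : List Int)
    (h : ∀ x ∈ l, x ≠ v) :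
    (List.replicate m v ++ l).takeWhile (fun x => x == v) = List.replicate m v ∧
    (List.replicate m v ++ l).dropWhile (fun x => x == v) = l := by
  induction m with
  | zero =>
    simp only [List.replicate_zero, List.nil_append]
    cases l with
    | nil => simp
    | cons x t =>
      have : (x == v) = false := by simpa using h x (List.mem_cons_self ..)
      simp [this]
  | succ m ih =>
    simp [List.replicate_succ, ih]

theorem scanRuns_flatMap (cnt : Int → Int) (k : Int) : ∀ (vals : List Int) (d : Int),
    vals.Nodup → (∀ v ∈ vals, 1 ≤ cnt v) →
    scanRuns k (vals.flatMap (fun v => List.replicate (cnt v).toNat v)) d = dRec cnt k vals d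
  | [], d, _, _ => by rw [List.flatMap_nil, scanRuns]; rfl
  | v :: t, d, hnd, h1 => by
    have hv : 1 ≤ cnt v := h1 v (List.mem_cons_self ..)
    obtain ⟨m, hm⟩ : ∃ m : Nat, (cnt v).toNat = m + 1 := ⟨(cnt v).toNat - 1, by omega⟩
    rw [List.nodup_cons] at hnd
    have hne : ∀ x ∈ t.flatMap (fun v => List.replicate (cnt v).toNat v), x ≠ v := by
      intro x hx
      obtain ⟨w, hw, hxw⟩ := List.mem_flatMap.1 hx
      rw [List.eq_of_mem_replicate hxw]
      exact fun hc => hnd.1 (hc ▸ hw)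
    obtain ⟨htw, hdw⟩ := takeWhile_replicate_append v m _ hne
    have hflat : (v :: t).flatMap (fun v => List.replicate (cnt v).toNat v) =
        v :: (List.replicate m v ++ t.flatMap (fun v => List.replicate (cnt v).toNat v)) := by
      rw [List.flatMap_cons, hm, List.replicate_succ, List.cons_append]
    rw [hflat]
    rw [show ∀ (l : List Int) (d : Int), scanRuns k (v :: l) d =
        (if (l.takeWhile (fun x => x == v)).length = 0 ∨ d + (l.takeWhile (fun x => x == v)).length ≤ k
         then v :: (scanRuns k (l.dropWhile (fun x => x == v)) (d + (l.takeWhile (fun x => x == v)).length)).1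
         else (scanRuns k (l.dropWhile (fun x => x == v)) (d + (l.takeWhile (fun x => x == v)).length)).1,
         (scanRuns k (l.dropWhile (fun x => x == v)) (d + (l.takeWhile (fun x => x == v)).length)).2)
      from fun l d => by rw [scanRuns], htw, hdw,
      scanRuns_flatMap cnt k t _ hnd.2 (fun w hw => h1 w (List.mem_cons_of_mem _ hw))]
    simp only [dRec, List.length_replicate]
    have hdm : d + (m : Int) = d + cnt v - 1 := by omega
    have hcond : (m = 0 ∨ d + cnt v - 1 ≤ k) ↔ (cnt v = 1 ∨ d + cnt v - 1 ≤ k) := by omega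
    rw [hdm]
    simp only [hcond]

-- counts of the grouped-runs list
theorem count_flatMap_replicate (c : Int → Nat) (x : Int) : ∀ (vals : List Int), vals.Nodup →
    (vals.flatMap (fun v => List.replicate (c v) v)).count x = if x ∈ vals then c x else 0
  | [], _ => by simp
  | v :: t, hnd => by
    rw [List.nodup_cons] at hnd
    rw [List.flatMap_cons, List.count_append, List.count_replicate,
      count_flatMap_replicate c x t hnd.2]
    by_cases hx : x = v
    · subst hx
      simp [hnd.1]
    · simp [hx, Ne.symm hx]

theorem flatMap_pairwise_ge (c : Int → Nat) : ∀ (l : List Int),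
    l.Pairwise (fun a b => b < a) →
    (l.flatMap (fun v => List.replicate (c v) v)).Pairwise (fun a b : Int => b ≤ a)
  | [], _ => by simp
  | v :: t, hgt => by
    rw [List.pairwise_cons] at hgt
    rw [List.flatMap_cons, List.pairwise_append]
    refine ⟨List.pairwise_replicate.2 (Or.inr le_rfl), flatMap_pairwise_ge c t hgt.2, ?_⟩
    intro a ha b hb
    obtain ⟨w, hw, hbw⟩ := List.mem_flatMap.1 hb
    rw [List.eq_of_mem_replicate ha, List.eq_of_mem_replicate hbw]
    exact le_of_lt (hgt.1 w hw)

-- sorted(nums, reverse=True) is the runs of the descending distinct values, each repeated count times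
theorem sorted_full_eq_flatMap (nums : List Int) :
    PySem.List.sorted nums (fun x => x) true =
      (PySem.List.sorted (PySem.Set.ofList nums) (fun x => x) true).flatMap
        (fun v => List.replicate (nums.count v) v) := by
  have hndV : (PySem.List.sorted (PySem.Set.ofList nums) (fun x => x) true).Nodup :=
    (PySem.List.sorted_perm _ _ _).nodup_iff.2 (PySem.Set.nodup_ofList nums)
  have hmemV : ∀ x, x ∈ PySem.List.sorted (PySem.Set.ofList nums) (fun x => x) true ↔ x ∈ nums := by
    intro x
    rw [PySem.List.mem_sorted, PySem.Set.mem_ofList]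
  have hperm : (PySem.List.sorted nums (fun x => x) true).Perm
      ((PySem.List.sorted (PySem.Set.ofList nums) (fun x => x) true).flatMap
        (fun v => List.replicate (nums.count v) v)) := by
    refine (PySem.List.sorted_perm nums (fun x => x) true).trans (List.perm_iff_count.2 ?_)
    intro x
    rw [count_flatMap_replicate _ _ _ hndV]
    by_cases hx : x ∈ nums
    · simp [(hmemV x).2 hx]
    · simp [List.count_eq_zero.2 hx]
  have hsL : (PySem.List.sorted nums (fun x => x) true).Pairwise (fun a b : Int => b ≤ a) :=
    PySem.List.sorted_pairwise_rev nums (fun x => x)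
  have hsR : ((PySem.List.sorted (PySem.Set.ofList nums) (fun x => x) true).flatMap
      (fun v => List.replicate (nums.count v) v)).Pairwise (fun a b : Int => b ≤ a) :=
    flatMap_pairwise_ge _ _ (vals_pairwise_gt (PySem.Set.ofList nums) (PySem.Set.nodup_ofList nums))
  exact hperm.eq_of_pairwise (fun a b _ _ h1 h2 => le_antisymm h2 h1) hsL hsR

-- A's budget recursion and B's prefix-sum recursion agree (list, and trailing trim via toNat)
theorem bRec_eq_dRec (cnt : Int → Int) (k : Int) : ∀ (vals : List Int) (b d : Int),
    (∀ v ∈ vals, 1 ≤ cnt v) → b.toNat = (k - d).toNat →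
    (bRec cnt vals b).1 = (dRec cnt k vals d).1 ∧
    (bRec cnt vals b).2.toNat = (k - (dRec cnt k vals d).2).toNat
  | [], b, d, _, hbd => ⟨rfl, hbd⟩
  | v :: t, b, d, h1, hbd => by
    have hv : 1 ≤ cnt v := h1 v (List.mem_cons_self ..)
    have ht := fun w hw => h1 w (List.mem_cons_of_mem _ hw)
    have hbd' : (b - min (cnt v - 1) (max b 0)).toNat = (k - (d + cnt v - 1)).toNat := by omega
    obtain ⟨ih1, ih2⟩ := bRec_eq_dRec cnt k t (b - min (cnt v - 1) (max b 0)) (d + cnt v - 1) ht hbd'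
    have hcond : (cnt v - min (cnt v - 1) (max b 0) = 1) ↔ (cnt v = 1 ∨ d + cnt v - 1 ≤ k) := by omega
    simp only [bRec, dRec]
    refine ⟨?_, ih2⟩
    by_cases hc : cnt v = 1 ∨ d + cnt v - 1 ≤ k
    · rw [if_pos (hcond.2 hc), if_pos hc, ih1]
    · rw [if_neg (fun h => hc (hcond.1 h)), if_neg hc, ih1]

theorem sorted_keys_count_pos (nums : List Int) :
    ∀ v ∈ PySem.List.sorted (PySem.Set.ofList nums) (fun x => x) true,
      1 ≤ (nums.count v : Int) := by
  intro v hv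
  have hv' : v ∈ nums := by
    have := (PySem.List.mem_sorted _ _ _ _).1 hv
    exact (PySem.Set.mem_ofList _ _).1 this
  have := List.count_pos_iff.2 hv'
  omega

-- ===== VERDICT (by name: the statement is the Claim_ definition above) =====
theorem findMaxDinstinctElements_spec : Claim_equal_findMaxDinstinctElements := by
  intro nums k _
  unfold Spec_findMaxDinstinctElements findMaxDinstinctElements findMaxDinstinctElements_alt
  simp only [PySem.Dict.foldl_insert_getD_add_one_eq_counter]
  set vals := PySem.List.sorted (PySem.Set.ofList nums) (fun x => x) true with hvals
  have hheap : (PySem.Dict.counter nums).items.foldl (fun h p => pyHeapPush h (-p.1, p.2)) [] =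
      vals.map (fun v => (-v, (nums.count v : Int))) := by
    rw [PySem.Dict.items_counter,
      ← List.foldl_map (f := fun p : Int × Int => (-p.1, p.2)) (g := pyHeapPush),
      List.map_map]
    exact heapFold_eq_sorted _ _ (PySem.Set.nodup_ofList nums)
  have hcnt : ∀ v ∈ vals, 1 ≤ ((nums.count v : Int)) := sorted_keys_count_pos nums
  -- B side: sorted full list = grouped runs, run scan = dRec
  have hflat : PySem.List.sorted nums (fun x => x) true =
      vals.flatMap (fun v => List.replicate ((nums.count v : Int)).toNat v) := by
    have := sorted_full_eq_flatMap nums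
    simpa using this
  rw [hheap, popLoop_eq_bRec _ _ _ hcnt, hflat,
    scanRuns_flatMap (fun v => (nums.count v : Int)) k vals 0
      ((PySem.List.sorted_perm _ _ _).nodup_iff.2 (PySem.Set.nodup_ofList nums)) hcnt]
  obtain ⟨h1, h2⟩ := bRec_eq_dRec (fun v => (nums.count v : Int)) k vals k 0
    hcnt (by omega)
  set stA := bRec (fun v => (nums.count v : Int)) vals k
  set stB := dRec (fun v => (nums.count v : Int)) k vals 0
  unfold trimLoop
  rw [trimGo_eq, h1, h2]
  by_cases h : 0 < k - stB.2
  · rw [if_pos h]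
    obtain ⟨n, hn, hnpos⟩ : ∃ n : Nat, k - stB.2 = (n : Int) ∧ 0 < n := ⟨(k - stB.2).toNat, by omega, by omega⟩
    rw [hn, PySem.List.slice_to_neg_natCast stB.1 n hnpos, Int.toNat_natCast]
  · rw [if_neg h]
    have : (k - stB.2).toNat = 0 := by omega
    simp [this]
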